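-- pv_equiv track=rewrite | github.com/marcndo/algo_ds_playground | problems/two_pointers/remove_duplicates2.py | remove_duplicates_brute_force
-- ===== SOURCE A (Python) =====
-- def remove_duplicates_brute_force(nums):
--     count = {}
--     new_nums = []
--     for num in nums:
--         current_count = count.get(num, 0)
--         if current_count < 2:
--             new_nums.append(num)
--             count[num] = current_count + 1
--     return len(new_nums)
-- ===== SOURCE B (Python) =====
-- from collections import Counter
--
-- def remove_duplicates_brute_force(nums):
--     return sum(min(c, 2) for c in Counter(nums).values())
-- ===== Notes on version B (the rewrite author's own statement) =====
-- stated objective: simpler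
-- what changed: Replaced the gated-append loop that builds an intermediate list with a count-all-then-aggregate decomposition: build Counter(nums) in one pass and return sum(min(c, 2) for c in its values), building no intermediate list.
import Mathlib
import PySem

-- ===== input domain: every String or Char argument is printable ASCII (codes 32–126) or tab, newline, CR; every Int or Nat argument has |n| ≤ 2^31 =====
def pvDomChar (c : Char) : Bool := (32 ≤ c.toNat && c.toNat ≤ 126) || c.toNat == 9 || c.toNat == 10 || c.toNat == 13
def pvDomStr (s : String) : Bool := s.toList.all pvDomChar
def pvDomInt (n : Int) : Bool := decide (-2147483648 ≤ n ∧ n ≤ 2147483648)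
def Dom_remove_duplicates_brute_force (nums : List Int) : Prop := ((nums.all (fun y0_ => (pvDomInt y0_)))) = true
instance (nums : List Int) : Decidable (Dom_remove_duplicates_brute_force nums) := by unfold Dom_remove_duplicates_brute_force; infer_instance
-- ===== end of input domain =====

-- B replaces A's gated-append loop (dict of capped counts + intermediate list) by counting
-- everything once (Counter) and summing min(count, 2) over the values — simpler, no intermediate list.

-- ===== PORT A =====
-- literal port: state is (count : dict, new_nums : list); answer is len(new_nums)
def remove_duplicates_brute_force (nums : List Int) : Int :=
  let st := nums.foldl
    (fun (s : PySem.Dict Int Int × List Int) num =>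
      let current_count := s.1.getD num 0
      if current_count < 2 then (s.1.insert num (current_count + 1), s.2 ++ [num]) else s)
    (PySem.Dict.empty, [])
  (st.2.length : Int)

-- ===== PORT B =====
-- literal port of Source B: sum(min(c, 2) for c in Counter(nums).values())
def remove_duplicates_brute_force_alt (nums : List Int) : Int :=
  (((PySem.Dict.counter nums).values).map (fun c => min c 2)).sum

-- ===== PRECONDITION & SPEC =====
def Spec_remove_duplicates_brute_force (nums : List Int) (out : Int) : Prop := out = remove_duplicates_brute_force_alt nums
instance (nums : List Int) (out : Int) : Decidable (Spec_remove_duplicates_brute_force nums out) := by unfold Spec_remove_duplicates_brute_force; infer_instance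

-- ===== CLAIM (what is proved, stated in full; the proofs are below) =====
def Claim_equal_remove_duplicates_brute_force : Prop := ∀ (nums : List Int), Dom_remove_duplicates_brute_force nums → Spec_remove_duplicates_brute_force nums (remove_duplicates_brute_force nums)

-- ===== LEMMAS AND PROOFS =====

-- reference count: number of elements A's loop appends given prior per-value counts c
def pvExtra (c : Int → Nat) : List Int → Nat
  | [] => 0
  | x :: xs => (if c x < 2 then 1 else 0) + pvExtra (fun v => if v = x then c v + 1 else c v) xs

-- A's loop, starting from any state whose dict stores min(c v, 2), appends pvExtra c xs elements
lemma pvLoopA (xs : List Int) (d : PySem.Dict Int Int) (l : List Int) (c : Int → Nat)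
    (h : ∀ v, d.getD v 0 = ((min (c v) 2 : Nat) : Int)) :
    (xs.foldl
      (fun (s : PySem.Dict Int Int × List Int) num =>
        let current_count := s.1.getD num 0
        if current_count < 2 then (s.1.insert num (current_count + 1), s.2 ++ [num]) else s)
      (d, l)).2.length = l.length + pvExtra c xs := by
  induction xs generalizing d l c with
  | nil => simp [pvExtra]
  | cons x t ih =>
    simp only [List.foldl_cons, pvExtra]
    by_cases hx : c x < 2
    · have hm : min (c x) 2 = c x := Nat.min_eq_left (by omega)
      simp only [h x, hm]
      rw [if_pos (by exact_mod_cast hx)]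
      rw [ih _ _ (fun v => if v = x then c v + 1 else c v) ?_]
      · simp [hx]; omega
      · intro v
        by_cases hv : v = x
        · subst hv
          rw [PySem.Dict.getD_insert_self]
          have hm1 : min (c v + 1) 2 = c v + 1 := by omega
          simp [hm1]
        · rw [PySem.Dict.getD_insert_of_ne _ _ _ hv]
          simp [hv, h v]
    · have hm : min (c x) 2 = 2 := Nat.min_eq_right (by omega)
      simp only [h x, hm]
      rw [if_neg (by norm_num)]
      rw [ih _ _ (fun v => if v = x then c v + 1 else c v) ?_]
      · simp [hx]
      · intro v
        by_cases hv : v = x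
        · subst hv
          have hm1 : min (c v + 1) 2 = 2 := by omega
          simp [hm1, h v, hm]
        · simp [hv, h v]

-- summing a function that changes only at one element of a Nodup list
lemma pvSumShift (L : List Int) (f g : Int → Nat) (x : Int) (d : Nat)
    (hnd : L.Nodup) (hx : x ∈ L) (hne : ∀ k ∈ L, k ≠ x → f k = g k) (hfx : f x = g x + d) :
    (L.map f).sum = (L.map g).sum + d := by
  induction L with
  | nil => cases hx
  | cons a t ih =>
    simp only [List.nodup_cons] at hnd
    rcases List.mem_cons.mp hx with h | h
    · subst h
      have hall : ∀ k ∈ t, f k = g k := fun k hk =>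
        hne k (List.mem_cons_of_mem _ hk) (fun e => hnd.1 (e ▸ hk))
      simp only [List.map_cons, List.sum_cons, hfx, List.map_congr_left hall]
      omega
    · have ha : a ≠ x := fun e => hnd.1 (e ▸ h)
      simp only [List.map_cons, List.sum_cons, hne a (List.mem_cons_self) ha,
        ih hnd.2 h (fun k hk => hne k (List.mem_cons_of_mem _ hk))]
      omega

-- pvExtra as a sum over any Nodup list containing the elements of xs
lemma pvExtraSum (xs : List Int) (c : Int → Nat) (L : List Int)
    (hnd : L.Nodup) (hmem : ∀ v ∈ xs, v ∈ L) :
    pvExtra c xs = (L.map (fun k => min (c k + xs.count k) 2 - min (c k) 2)).sum := by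
  induction xs generalizing c with
  | nil => simp [pvExtra]
  | cons x t ih =>
    have hxL : x ∈ L := hmem x List.mem_cons_self
    rw [pvExtra, ih (fun v => if v = x then c v + 1 else c v)
      (fun v hv => hmem v (List.mem_cons_of_mem _ hv))]
    rw [Nat.add_comm]
    refine (pvSumShift L _ _ x _ hnd hxL ?_ ?_).symm
    · intro k hk hkx
      have hc : (x :: t).count k = t.count k := by
        rw [List.count_cons]; simp [Ne.symm hkx]
      simp [hc, hkx]
    · have hc : (x :: t).count x = t.count x + 1 := by simp
      simp only [hc]
      by_cases hx : c x < 2 <;> simp only [hx, if_true, if_false] <;> omega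

-- ===== VERDICT (by name: the statement is the Claim_ definition above) =====
theorem remove_duplicates_brute_force_spec : Claim_equal_remove_duplicates_brute_force := by
  intro nums _
  unfold Spec_remove_duplicates_brute_force remove_duplicates_brute_force remove_duplicates_brute_force_alt
  have hA := pvLoopA nums PySem.Dict.empty [] (fun _ => 0) (fun v => rfl)
  simp only [List.length_nil, Nat.zero_add] at hA
  show ((nums.foldl
      (fun (s : PySem.Dict Int Int × List Int) num =>
        let current_count := s.1.getD num 0
        if current_count < 2 then (s.1.insert num (current_count + 1), s.2 ++ [num]) else s)
      (PySem.Dict.empty, [])).2.length : Int)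
    = (((PySem.Dict.counter nums).values).map (fun c => min c 2)).sum
  rw [hA]
  have hv : (PySem.Dict.counter nums).values
      = (PySem.Set.ofList nums).map (fun k => ((nums.count k : Nat) : Int)) := by
    show ((PySem.Dict.counter nums).items).map (·.2) = _
    rw [PySem.Dict.items_counter]
    simp [List.map_map, Function.comp]
  rw [hv, List.map_map]
  rw [pvExtraSum nums (fun _ => 0) (PySem.Set.ofList nums)
    (PySem.Set.nodup_ofList nums) (fun v hv => (PySem.Set.mem_ofList nums v).mpr hv)]
  simp only [Nat.zero_add]
  rw [Nat.cast_list_sum, List.map_map]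
  apply congrArg List.sum
  apply List.map_congr_left
  intro k _
  simp only [Function.comp]
  omega
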